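-- pv_equiv track=rewrite | github.com/InsufficientLove/lmy-Digitalhuman | MuseTalkEngine/gpu_config.py | get_optimal_batch_size
-- ===== SOURCE A (Python) =====
-- GPU_MEMORY_CONFIG = {
--     # 批次大小配置
--     'batch_size': {
--         'default': 8,  # 默认批次大小（48GB单卡建议）
--         'min': 1,      # 最小批次大小
--         'max': 12,     # 最大批次大小
--     },
--
--     # 内存管理
--     'memory_fraction': 0.9,  # 每个GPU使用的最大内存比例（48GB 预留10%）
--     'max_split_size_mb': 256,  # PyTorch内存分配块大小
--
--     # 并发控制
--     'max_concurrent_batches_per_gpu': 2,  # 单卡并发批次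
--
--     # 内存清理
--     'aggressive_cleanup': True,  # 激进的内存清理模式
--     'cleanup_interval': 2,  # 每处理2个批次后强制清理内存
-- }
--
-- def get_optimal_batch_size(gpu_memory_gb=24):
--     """根据GPU内存动态计算最优批次大小"""
--     # 基于GPU内存的批次大小推荐
--     memory_to_batch = {
--         8: 2,    # 8GB GPU
--         12: 3,   # 12GB GPU
--         16: 4,   # 16GB GPU
--         24: 4,   # 24GB GPU (保守设置)
--         32: 6,   # 32GB GPU
--         40: 8,   # 40GB GPU
--         48: 10,  # 48GB GPU
--     }
--
--     # 找到最接近的内存配置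
--     for mem, batch in sorted(memory_to_batch.items()):
--         if gpu_memory_gb <= mem:
--             return batch
--
--     return GPU_MEMORY_CONFIG['batch_size']['default']
-- ===== SOURCE B (Python) =====
-- # Binary search over parallel sorted threshold/batch lists instead of a linear scan.
-- _MEMORY_TO_BATCH = {8: 2, 12: 3, 16: 4, 24: 4, 32: 6, 40: 8, 48: 10}
-- _THRESHOLDS = [m for m, _ in sorted(_MEMORY_TO_BATCH.items())]
-- _BATCHES = [b for _, b in sorted(_MEMORY_TO_BATCH.items())]
--
-- def get_optimal_batch_size(gpu_memory_gb=24):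
--     # hand-written bisect_left: first index with _THRESHOLDS[i] >= gpu_memory_gb
--     lo, hi = 0, len(_THRESHOLDS)
--     while lo < hi:
--         mid = (lo + hi) // 2
--         if _THRESHOLDS[mid] < gpu_memory_gb:
--             lo = mid + 1
--         else:
--             hi = mid
--     return _BATCHES[lo] if lo < len(_THRESHOLDS) else 8
-- ===== Notes on version B (the rewrite author's own statement) =====
-- stated objective: alternative
-- what changed: Replaces the linear first-match scan over the sorted dict with a binary search (hand-written bisect_left) over two parallel sorted lists of thresholds and batch sizes, falling back to the configured default past the last threshold.
import Mathlib
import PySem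

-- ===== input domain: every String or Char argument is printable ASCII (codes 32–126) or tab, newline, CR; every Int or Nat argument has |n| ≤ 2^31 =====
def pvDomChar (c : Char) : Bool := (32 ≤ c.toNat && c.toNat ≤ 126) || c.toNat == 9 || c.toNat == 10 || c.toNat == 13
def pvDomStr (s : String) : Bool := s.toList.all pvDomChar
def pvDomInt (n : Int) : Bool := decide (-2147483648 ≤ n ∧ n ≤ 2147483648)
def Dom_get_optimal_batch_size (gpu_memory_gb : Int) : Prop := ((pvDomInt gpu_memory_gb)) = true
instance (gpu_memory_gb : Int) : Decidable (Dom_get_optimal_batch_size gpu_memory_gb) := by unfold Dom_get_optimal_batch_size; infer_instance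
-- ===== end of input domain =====

-- B replaces A's linear first-match scan with a binary search (bisect_left) over parallel sorted lists (objective: alternative).

-- ===== PORT A =====
-- loop over sorted(memory_to_batch.items()); first mem with gpu_memory_gb <= mem returns its batch, else default 8
def pvScanA (gpu_memory_gb : Int) : List (Int × Int) → Int
  | [] => 8
  | (mem, batch) :: rest => if gpu_memory_gb ≤ mem then batch else pvScanA gpu_memory_gb rest

def get_optimal_batch_size (gpu_memory_gb : Int) : Int :=
  pvScanA gpu_memory_gb [(8, 2), (12, 3), (16, 4), (24, 4), (32, 6), (40, 8), (48, 10)]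

-- ===== PORT B =====
def pvThresholds : List Int := [8, 12, 16, 24, 32, 40, 48]
def pvBatches : List Int := [2, 3, 4, 4, 6, 8, 10]

-- hand-written bisect_left loop: while lo < hi, mid = (lo+hi)//2, …
def pvBisectB (gpu_memory_gb : Int) (lo hi : Nat) : Nat :=
  if h : lo < hi then
    let mid := (lo + hi) / 2
    if pvThresholds.getD mid 0 < gpu_memory_gb then
      pvBisectB gpu_memory_gb (mid + 1) hi
    else
      pvBisectB gpu_memory_gb lo mid
  else lo
termination_by hi - lo
decreasing_by all_goals omega

def get_optimal_batch_size_alt (gpu_memory_gb : Int) : Int :=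
  let lo := pvBisectB gpu_memory_gb 0 pvThresholds.length
  if lo < pvThresholds.length then pvBatches.getD lo 0 else 8

-- ===== PRECONDITION & SPEC =====
def Spec_get_optimal_batch_size (gpu_memory_gb : Int) (out : Int) : Prop := out = get_optimal_batch_size_alt gpu_memory_gb
instance (gpu_memory_gb : Int) (out : Int) : Decidable (Spec_get_optimal_batch_size gpu_memory_gb out) := by unfold Spec_get_optimal_batch_size; infer_instance

-- ===== CLAIM (what is proved, stated in full; the proofs are below) =====
def Claim_equal_get_optimal_batch_size : Prop := ∀ (gpu_memory_gb : Int), Dom_get_optimal_batch_size gpu_memory_gb → Spec_get_optimal_batch_size gpu_memory_gb (get_optimal_batch_size gpu_memory_gb)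

-- ===== LEMMAS AND PROOFS =====

-- ===== VERDICT (by name: the statement is the Claim_ definition above) =====
theorem get_optimal_batch_size_spec : Claim_equal_get_optimal_batch_size := by
  intro g _
  unfold Spec_get_optimal_batch_size get_optimal_batch_size get_optimal_batch_size_alt
  simp [pvScanA, pvBisectB, pvThresholds, pvBatches]
  split_ifs <;> (try norm_num) <;> omega
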